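-- pv_equiv track=rewrite | github.com/bphillab/Five_Thirty_Eight_Riddler | Riddler_19_11_22/Riddler_Express_19_11_22.py | convert_to_home_games
-- ===== SOURCE A (Python) =====
-- def convert_to_home_games(arr):
--     p1_home = [1, 2, 6, 7]
--     p2_home = [3, 4, 5]
--     temp = []
--     for i in range(len(arr)):
--         if i + 1 in p1_home:
--             temp = temp + [arr[i]]
--         if i + 1 in p2_home:
--             temp = temp + [1 - arr[i]]
--     return temp
-- ===== SOURCE B (Python) =====
-- def convert_to_home_games(arr):
--     # kept/flipped positions are three contiguous slices: keep [0:2], flip [2:5], keep [5:7]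
--     return list(arr[:2]) + [1 - x for x in arr[2:5]] + list(arr[5:7])
-- ===== Notes on version B (the rewrite author's own statement) =====
-- stated objective: simpler
-- what changed: Replaces the index loop with membership tests against fixed position lists by a direct concatenation of three contiguous slices (keep [0:2], flip [2:5], keep [5:7]).
import Mathlib
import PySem

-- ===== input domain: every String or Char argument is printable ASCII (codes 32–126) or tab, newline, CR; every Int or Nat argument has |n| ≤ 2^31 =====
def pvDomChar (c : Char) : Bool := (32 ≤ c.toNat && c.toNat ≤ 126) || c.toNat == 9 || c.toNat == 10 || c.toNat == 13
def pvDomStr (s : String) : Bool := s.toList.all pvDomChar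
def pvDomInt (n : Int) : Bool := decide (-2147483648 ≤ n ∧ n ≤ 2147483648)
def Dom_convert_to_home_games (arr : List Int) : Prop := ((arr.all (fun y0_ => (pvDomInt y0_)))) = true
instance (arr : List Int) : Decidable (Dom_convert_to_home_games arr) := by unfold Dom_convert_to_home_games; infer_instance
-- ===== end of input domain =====

-- B replaces A's index loop with a concatenation of three contiguous slices (simpler decomposition).

-- ===== PORT A =====
-- the loop body of A (membership tests against the fixed home lists)
def cthg_step (arr : List Int) (temp : List Int) (i : Int) : List Int :=
  let p1_home : List Int := [1, 2, 6, 7]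
  let p2_home : List Int := [3, 4, 5]
  let temp := if i + 1 ∈ p1_home then temp ++ [PySem.List.pyGetD arr i 0] else temp
  if i + 1 ∈ p2_home then temp ++ [1 - PySem.List.pyGetD arr i 0] else temp

def convert_to_home_games (arr : List Int) : List Int :=
  (PySem.List.pyRange 0 (arr.length : Int) 1).foldl (cthg_step arr) []

-- ===== PORT B =====
def convert_to_home_games_alt (arr : List Int) : List Int :=
  PySem.List.slice arr none (some 2)
    ++ (PySem.List.slice arr (some 2) (some 5)).map (fun x => 1 - x)
    ++ PySem.List.slice arr (some 5) (some 7)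

-- ===== PRECONDITION & SPEC =====
def Spec_convert_to_home_games (arr : List Int) (out : List Int) : Prop := out = convert_to_home_games_alt arr
instance (arr : List Int) (out : List Int) : Decidable (Spec_convert_to_home_games arr out) := by unfold Spec_convert_to_home_games; infer_instance

-- ===== CLAIM (what is proved, stated in full; the proofs are below) =====
def Claim_equal_convert_to_home_games : Prop := ∀ (arr : List Int), Dom_convert_to_home_games arr → Spec_convert_to_home_games arr (convert_to_home_games arr)

-- ===== LEMMAS AND PROOFS =====

-- A's loop body does nothing once the index is ≥ 7.
theorem cthg_step_id (arr temp : List Int) (i : Int) (hx : (7:Int) ≤ i) :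
    cthg_step arr temp i = temp := by
  unfold cthg_step
  have h1 : i + 1 ∉ ([1, 2, 6, 7] : List Int) := by simp; omega
  have h2 : i + 1 ∉ ([3, 4, 5] : List Int) := by simp; omega
  simp only [if_neg h1, if_neg h2]

theorem cthg_tail_id (arr : List Int) (l : List Int) (h : ∀ i ∈ l, (7:Int) ≤ i) (temp : List Int) :
    l.foldl (cthg_step arr) temp = temp := by
  induction l generalizing temp with
  | nil => rfl
  | cons x xs ih =>
    rw [List.foldl_cons, cthg_step_id arr temp x (h x (by simp))]
    exact ih (fun i hi => h i (by simp [hi])) temp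

-- ===== VERDICT (by name: the statement is the Claim_ definition above) =====
theorem convert_to_home_games_spec : Claim_equal_convert_to_home_games := by
  intro arr _
  unfold Spec_convert_to_home_games convert_to_home_games convert_to_home_games_alt
  match arr with
  | [] => decide
  | [a] => simp [cthg_step, PySem.List.pyRange_one, List.range_succ, PySem.List.slice, PySem.List.pyGetD_ofNat']
  | [a, b] => simp [cthg_step, PySem.List.pyRange_one, List.range_succ, PySem.List.slice, PySem.List.pyGetD_ofNat']
  | [a, b, c] => simp [cthg_step, PySem.List.pyRange_one, List.range_succ, PySem.List.slice, PySem.List.pyGetD_ofNat']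
  | [a, b, c, d] => simp [cthg_step, PySem.List.pyRange_one, List.range_succ, PySem.List.slice, PySem.List.pyGetD_ofNat']
  | [a, b, c, d, e] => simp [cthg_step, PySem.List.pyRange_one, List.range_succ, PySem.List.slice, PySem.List.pyGetD_ofNat']
  | [a, b, c, d, e, f] => simp [cthg_step, PySem.List.pyRange_one, List.range_succ, PySem.List.slice, PySem.List.pyGetD_ofNat']
  | a :: b :: c :: d :: e :: f :: g :: t =>
    have hlen : ((a :: b :: c :: d :: e :: f :: g :: t).length : Int) = 7 + (t.length : Int) := by
      simp; omega
    rw [hlen, PySem.List.pyRange_one_append 0 7 (7 + (t.length : Int)) (by omega) (by omega),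
        List.foldl_append]
    rw [cthg_tail_id _ _ (by intro i hi; rw [PySem.List.mem_pyRange_one] at hi; omega)]
    simp [cthg_step, PySem.List.pyRange_one, List.range_succ, PySem.List.slice, PySem.List.pyGetD_ofNat']
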